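-- pv_equiv track=rewrite | github.com/pallavy57/algorithms | lists/05_07_2023.py | maxIndexDiff
-- ===== SOURCE A (Python) =====
-- def max(a, b):
--     if (a > b):
--         return a
--     else:
--         return b
--
-- def min(a, b):
--     if (a < b):
--         return a
--     else:
--         return b
--
-- def maxIndexDiff(arr, n):
--     maxDiff = 0
--     LMin = [0] * n
--     RMax = [0] * n
--
--     # Construct LMin[] such that
--     # LMin[i] stores the minimum
--     # value from (arr[0], arr[1],
--     # ... arr[i])
--     LMin[0] = arr[0]
--     for i in range(1, n):
--         LMin[i] = min(arr[i], LMin[i - 1])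
--
--     # Construct RMax[] such that
--     # RMax[j] stores the maximum
--     # value from (arr[j], arr[j + 1],
--     # ..arr[n-1])
--     RMax[n - 1] = arr[n - 1]
--     for j in range(n - 2, -1, -1):
--         RMax[j] = max(arr[j], RMax[j + 1])
--
--     # Traverse both arrays from left
--     # to right to find optimum j - i
--     # This process is similar to
--     # merge() of MergeSort
--     i, j = 0, 0
--     maxDiff = -1
--     while (j < n and i < n):
--         if (LMin[i] <= RMax[j]):
--             maxDiff = max(maxDiff, j - i)
--             j = j + 1
--         else:
--             i = i + 1
--
--     return maxDiff
-- ===== SOURCE B (Python) =====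
-- def maxIndexDiff(arr, n):
--     # Direct brute force: for each i, scan j from the right and take the
--     # first (hence farthest) j with arr[j] >= arr[i].
--     maxDiff = -1
--     for i in range(n):
--         for j in range(n - 1, i - 1, -1):
--             if arr[j] >= arr[i]:
--                 if j - i > maxDiff:
--                     maxDiff = j - i
--                 break
--     return maxDiff
-- ===== Notes on version B (the rewrite author's own statement) =====
-- stated objective: simpler
-- what changed: Replaced the LMin/RMax auxiliary-table construction plus two-pointer merge with a plain nested scan that, for each i, finds the farthest j with arr[j] >= arr[i].
import Mathlib
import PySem

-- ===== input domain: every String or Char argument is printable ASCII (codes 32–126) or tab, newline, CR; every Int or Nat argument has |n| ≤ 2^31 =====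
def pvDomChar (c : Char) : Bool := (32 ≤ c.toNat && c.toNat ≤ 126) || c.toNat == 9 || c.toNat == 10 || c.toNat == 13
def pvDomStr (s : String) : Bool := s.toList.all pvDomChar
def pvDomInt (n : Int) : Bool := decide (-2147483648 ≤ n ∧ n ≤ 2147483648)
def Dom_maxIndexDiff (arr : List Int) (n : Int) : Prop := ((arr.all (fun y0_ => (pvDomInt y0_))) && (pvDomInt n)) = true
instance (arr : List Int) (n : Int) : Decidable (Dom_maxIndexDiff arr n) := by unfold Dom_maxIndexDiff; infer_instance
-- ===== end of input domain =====

-- B replaces A's LMin/RMax tables + two-pointer merge by a plain nested scan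
-- (for each i, the farthest j with arr[j] >= arr[i]); objective: simpler.

-- ===== PORT A =====
-- Python's module-level two-argument max/min helpers
def pyMax2 (a b : Int) : Int := if a > b then a else b
def pyMin2 (a b : Int) : Int := if a < b then a else b

-- the final 'while (j < n and i < n)' merge loop of A
def mergeLoop (LMin RMax : List Int) (n i j maxDiff : Int) : Int :=
  if _h : j < n ∧ i < n then
    if PySem.List.pyGetD LMin i 0 ≤ PySem.List.pyGetD RMax j 0 then
      mergeLoop LMin RMax n i (j + 1) (pyMax2 maxDiff (j - i))
    else
      mergeLoop LMin RMax n (i + 1) j maxDiff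
  else maxDiff
termination_by ((n - i) + (n - j)).toNat
decreasing_by all_goals omega

def maxIndexDiff (arr : List Int) (n : Int) : Int :=
  -- maxDiff = 0 (immediately dead: overwritten by -1 below, kept for fidelity)
  let _maxDiff0 : Int := 0
  let LMin0 : List Int := List.replicate n.toNat 0
  let RMax0 : List Int := List.replicate n.toNat 0
  let LMin1 := PySem.List.pySetD LMin0 0 (PySem.List.pyGetD arr 0 0)
  let LMin := (PySem.List.pyRange 1 n 1).foldl (fun L i =>
      PySem.List.pySetD L i (pyMin2 (PySem.List.pyGetD arr i 0) (PySem.List.pyGetD L (i - 1) 0))) LMin1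
  let RMax1 := PySem.List.pySetD RMax0 (n - 1) (PySem.List.pyGetD arr (n - 1) 0)
  let RMax := (PySem.List.pyRange (n - 2) (-1) (-1)).foldl (fun R j =>
      PySem.List.pySetD R j (pyMax2 (PySem.List.pyGetD arr j 0) (PySem.List.pyGetD R (j + 1) 0))) RMax1
  mergeLoop LMin RMax n 0 0 (-1)

-- ===== PORT B =====
-- inner 'for j in range(n-1, i-1, -1): … break' loop of B
def altInner (arr : List Int) (i : Int) (js : List Int) (maxDiff : Int) : Int :=
  match js with
  | [] => maxDiff
  | j :: rest =>
    if PySem.List.pyGetD arr j 0 ≥ PySem.List.pyGetD arr i 0 then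
      (if j - i > maxDiff then j - i else maxDiff)
    else altInner arr i rest maxDiff

def maxIndexDiff_alt (arr : List Int) (n : Int) : Int :=
  (PySem.List.pyRange 0 n 1).foldl
    (fun maxDiff i => altInner arr i (PySem.List.pyRange (n - 1) (i - 1) (-1)) maxDiff) (-1)

-- ===== PRECONDITION & SPEC =====
-- A indexes arr[0], arr[n-1] and writes LMin[0], so it raises IndexError unless 1 ≤ n ≤ len(arr).
def Pre_maxIndexDiff (arr : List Int) (n : Int) : Prop := 1 ≤ n ∧ n ≤ (arr.length : Int)
instance (arr : List Int) (n : Int) : Decidable (Pre_maxIndexDiff arr n) := by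
  unfold Pre_maxIndexDiff; infer_instance

def pvWitness_maxIndexDiff : List Int × Int := ([3, 1, 4, 2], 4)

def Spec_maxIndexDiff (arr : List Int) (n : Int) (out : Int) : Prop := out = maxIndexDiff_alt arr n
instance (arr : List Int) (n : Int) (out : Int) : Decidable (Spec_maxIndexDiff arr n out) := by
  unfold Spec_maxIndexDiff; infer_instance

-- ===== CLAIM (what is proved, stated in full; the proofs are below) =====
def Claim_equal_maxIndexDiff : Prop := ∀ (arr : List Int) (n : Int),
  Dom_maxIndexDiff arr n → Pre_maxIndexDiff arr n → Spec_maxIndexDiff arr n (maxIndexDiff arr n)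

-- ===== LEMMAS AND PROOFS =====

-- abbreviation used throughout the proofs
def aGet (arr : List Int) (t : Int) : Int := PySem.List.pyGetD arr t 0

-- --- B-side characterization ---

theorem altInner_ge (arr : List Int) (i : Int) (js : List Int) (md : Int) :
    md ≤ altInner arr i js md := by
  induction js generalizing md with
  | nil => simp [altInner]
  | cons j rest ih =>
    simp only [altInner]
    split
    · split <;> omega
    · exact ih md

theorem altStep_ge (arr : List Int) (n md i : Int) :
    md ≤ altInner arr i (PySem.List.pyRange (n - 1) (i - 1) (-1)) md :=
  altInner_ge arr i _ md

theorem foldl_altStep_ge (arr : List Int) (n : Int) (l : List Int) (md : Int) :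
    md ≤ l.foldl (fun maxDiff i => altInner arr i (PySem.List.pyRange (n - 1) (i - 1) (-1)) maxDiff) md := by
  induction l generalizing md with
  | nil => simp
  | cons x rest ih =>
    exact le_trans (altStep_ge arr n md x) (ih _)

theorem alt_ge_neg_one (arr : List Int) (n : Int) : -1 ≤ maxIndexDiff_alt arr n := by
  unfold maxIndexDiff_alt
  exact foldl_altStep_ge arr n _ (-1)

-- lower bound: any valid pair is dominated by the inner scan's first (largest) hit
theorem altInner_lb (arr : List Int) (i : Int) (js : List Int) (md j : Int)
    (hmem : j ∈ js) (hpair : List.Pairwise (fun x y => y < x) js)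
    (ha : aGet arr i ≤ aGet arr j) :
    j - i ≤ altInner arr i js md := by
  simp only [aGet] at ha
  induction js generalizing md with
  | nil => simp at hmem
  | cons x rest ih =>
    simp only [altInner]
    rcases List.mem_cons.mp hmem with rfl | hrest
    · rw [if_pos (show PySem.List.pyGetD arr j 0 ≥ PySem.List.pyGetD arr i 0 from ha)]
      split <;> omega
    · have hxj : j < x := (List.pairwise_cons.mp hpair).1 j hrest
      by_cases hx : PySem.List.pyGetD arr x 0 ≥ PySem.List.pyGetD arr i 0
      · rw [if_pos hx]
        split <;> omega
      · rw [if_neg hx]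
        exact ih md hrest (List.pairwise_cons.mp hpair).2

theorem pairwise_gt_pyRange_neg_one (a b : Int) :
    List.Pairwise (fun x y => y < x) (PySem.List.pyRange a b (-1)) := by
  rw [PySem.List.pyRange_neg_one_eq_reverse]
  rw [List.pairwise_reverse]
  exact PySem.List.pairwise_lt_pyRange_one _ _

theorem foldl_altStep_lb (arr : List Int) (n : Int) (l : List Int) (md i j : Int)
    (hi : i ∈ l) (hj : i ≤ j) (hjn : j ≤ n - 1) (ha : aGet arr i ≤ aGet arr j) :
    j - i ≤ l.foldl (fun maxDiff i => altInner arr i (PySem.List.pyRange (n - 1) (i - 1) (-1)) maxDiff) md := by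
  induction l generalizing md with
  | nil => simp at hi
  | cons x rest ih =>
    rcases List.mem_cons.mp hi with rfl | hrest
    · simp only [List.foldl_cons]
      refine le_trans ?_ (foldl_altStep_ge arr n rest _)
      exact altInner_lb arr i _ md j
        (by rw [PySem.List.mem_pyRange_neg_one]; omega)
        (pairwise_gt_pyRange_neg_one _ _) ha
    · exact ih _ hrest

theorem alt_lb (arr : List Int) (n i j : Int) (h0 : 0 ≤ i) (hij : i ≤ j) (hjn : j < n)
    (ha : aGet arr i ≤ aGet arr j) : j - i ≤ maxIndexDiff_alt arr n := by
  unfold maxIndexDiff_alt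
  exact foldl_altStep_lb arr n _ (-1) i j
    (by rw [PySem.List.mem_pyRange_one]; omega) hij (by omega) ha

-- upper bound: the result is -1 or equal to j - i for some valid pair
theorem altInner_cases (arr : List Int) (i : Int) (js : List Int) (md : Int) :
    altInner arr i js md = md ∨
      ∃ j ∈ js, aGet arr i ≤ aGet arr j ∧ altInner arr i js md = j - i := by
  induction js generalizing md with
  | nil => left; simp [altInner]
  | cons x rest ih =>
    simp only [altInner, aGet]
    by_cases hx : PySem.List.pyGetD arr x 0 ≥ PySem.List.pyGetD arr i 0
    · rw [if_pos hx]
      by_cases hgt : x - i > md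
      · right; exact ⟨x, List.mem_cons_self, hx, by rw [if_pos hgt]⟩
      · left; rw [if_neg hgt]
    · rw [if_neg hx]
      rcases ih md with h | ⟨j, hj, hja, hres⟩
      · left; exact h
      · right; exact ⟨j, List.mem_cons_of_mem _ hj, hja, hres⟩

theorem foldl_altStep_cases (arr : List Int) (n : Int) (l : List Int) (md : Int) :
    l.foldl (fun maxDiff i => altInner arr i (PySem.List.pyRange (n - 1) (i - 1) (-1)) maxDiff) md = md ∨
      ∃ i ∈ l, ∃ j, i ≤ j ∧ j < n ∧ aGet arr i ≤ aGet arr j ∧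
        l.foldl (fun maxDiff i => altInner arr i (PySem.List.pyRange (n - 1) (i - 1) (-1)) maxDiff) md = j - i := by
  induction l generalizing md with
  | nil => left; rfl
  | cons x rest ih =>
    simp only [List.foldl_cons]
    rcases ih (altInner arr x (PySem.List.pyRange (n - 1) (x - 1) (-1)) md) with h | ⟨i, hi, j, h1, h2, h3, h4⟩
    · rw [h]
      rcases altInner_cases arr x (PySem.List.pyRange (n - 1) (x - 1) (-1)) md with h' | ⟨j, hj, hja, hres⟩
      · left; exact h'
      · right
        rw [PySem.List.mem_pyRange_neg_one] at hj
        exact ⟨x, List.mem_cons_self, j, by omega, by omega, hja, hres⟩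
    · right; exact ⟨i, List.mem_cons_of_mem _ hi, j, h1, h2, h3, h4⟩

theorem alt_cases (arr : List Int) (n : Int) :
    maxIndexDiff_alt arr n = -1 ∨
      ∃ i j, 0 ≤ i ∧ i ≤ j ∧ j < n ∧ aGet arr i ≤ aGet arr j ∧ maxIndexDiff_alt arr n = j - i := by
  unfold maxIndexDiff_alt
  rcases foldl_altStep_cases arr n (PySem.List.pyRange 0 n 1) (-1) with h | ⟨i, hi, j, h1, h2, h3, h4⟩
  · left; exact h
  · right
    rw [PySem.List.mem_pyRange_one] at hi
    exact ⟨i, j, by omega, h1, h2, h3, h4⟩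

-- --- A-side: properties of the constructed LMin / RMax lists ---

-- invariant properties we need of the LMin table
def LProp (arr : List Int) (n : Int) (L : List Int) (k : Int) : Prop :=
  L.length = n.toNat ∧
  ∀ t : Int, 0 ≤ t → t < k →
    (∃ i₀, 0 ≤ i₀ ∧ i₀ ≤ t ∧ PySem.List.pyGetD L t 0 = aGet arr i₀) ∧
    PySem.List.pyGetD L t 0 ≤ aGet arr t

def RProp (arr : List Int) (n : Int) (R : List Int) (k : Int) : Prop :=
  R.length = n.toNat ∧
  (∀ t : Int, k < t → t < n →
    (∃ j₀, t ≤ j₀ ∧ j₀ < n ∧ PySem.List.pyGetD R t 0 = aGet arr j₀) ∧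
    aGet arr t ≤ PySem.List.pyGetD R t 0) ∧
  (∀ t : Int, k < t → t + 1 < n → PySem.List.pyGetD R (t + 1) 0 ≤ PySem.List.pyGetD R t 0)

theorem pyMin2_le_left (a b : Int) : pyMin2 a b ≤ a := by unfold pyMin2; split <;> omega
theorem pyMin2_cases (a b : Int) : pyMin2 a b = a ∨ pyMin2 a b = b := by unfold pyMin2; split <;> simp
theorem pyMax2_ge_left (a b : Int) : a ≤ pyMax2 a b := by unfold pyMax2; split <;> omega
theorem pyMax2_ge_right (a b : Int) : b ≤ pyMax2 a b := by unfold pyMax2; split <;> omega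
theorem pyMax2_cases (a b : Int) : pyMax2 a b = a ∨ pyMax2 a b = b := by unfold pyMax2; split <;> simp

-- reading a pySetD-updated list (Int indices, in range)
theorem pyGetD_pySetD_int (L : List Int) (k t v : Int) (h0 : 0 ≤ k) (hk : k < (L.length : Int))
    (ht : 0 ≤ t) :
    PySem.List.pyGetD (PySem.List.pySetD L k v) t 0 = if t = k then v else PySem.List.pyGetD L t 0 := by
  have hke : k = ((k.toNat : Nat) : Int) := by omega
  have hte : t = ((t.toNat : Nat) : Int) := by omega
  rw [hke, hte, PySem.List.pyGetD_pySetD_natCast L k.toNat t.toNat v 0 (by omega)]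
  by_cases h : t.toNat = k.toNat
  · rw [if_pos h, if_pos (by omega : ((t.toNat : Nat) : Int) = ((k.toNat : Nat) : Int))]
  · rw [if_neg h, if_neg (by omega : ¬ ((t.toNat : Nat) : Int) = ((k.toNat : Nat) : Int))]

theorem LMin_fold_prop (arr : List Int) (n : Int) (hn : 1 ≤ n) :
    ∀ (N : Nat) (k : Int) (L : List Int), (n - k).toNat ≤ N → 1 ≤ k → k ≤ n → LProp arr n L k →
    LProp arr n ((PySem.List.pyRange k n 1).foldl (fun L i =>
      PySem.List.pySetD L i (pyMin2 (PySem.List.pyGetD arr i 0) (PySem.List.pyGetD L (i - 1) 0))) L) n := by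
  intro N
  induction N with
  | zero =>
    intro k L hN hk hkn hL
    have hkn' : n ≤ k := by omega
    rw [PySem.List.pyRange_one_eq_nil hkn']
    have : k = n := by omega
    subst this; exact hL
  | succ N ih =>
    intro k L hN hk hkn hL
    by_cases hlt : k < n
    · rw [PySem.List.pyRange_one_cons hlt, List.foldl_cons]
      apply ih (k + 1) _ (by omega) (by omega) (by omega)
      obtain ⟨hlen, hent⟩ := hL
      refine ⟨by rw [PySem.List.length_pySetD]; exact hlen, ?_⟩
      intro t ht0 htk
      have hset := pyGetD_pySetD_int L k t
        (pyMin2 (PySem.List.pyGetD arr k 0) (PySem.List.pyGetD L (k - 1) 0)) (by omega) (by omega)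
        (by omega)
      by_cases hteq : t = k
      · subst hteq
        rw [hset, if_pos rfl]
        obtain ⟨⟨i₀, hi0, hi1, hi2⟩, hle⟩ := hent (t - 1) (by omega) (by omega)
        constructor
        · rcases pyMin2_cases (PySem.List.pyGetD arr t 0) (PySem.List.pyGetD L (t - 1) 0) with h | h
          · exact ⟨t, by omega, by omega, by rw [h]; rfl⟩
          · exact ⟨i₀, by omega, by omega, by rw [h]; exact hi2⟩
        · exact pyMin2_le_left _ _
      · rw [hset, if_neg hteq]
        exact hent t ht0 (by omega)
    · rw [PySem.List.pyRange_one_eq_nil (by omega)]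
      have : k = n := by omega
      subst this; exact hL

theorem RMax_fold_prop (arr : List Int) (n : Int) (hn : 1 ≤ n) :
    ∀ (N : Nat) (k : Int) (R : List Int), (k + 1).toNat ≤ N → -1 ≤ k → k ≤ n - 2 → RProp arr n R k →
    RProp arr n ((PySem.List.pyRange k (-1) (-1)).foldl (fun R j =>
      PySem.List.pySetD R j (pyMax2 (PySem.List.pyGetD arr j 0) (PySem.List.pyGetD R (j + 1) 0))) R) (-1) := by
  intro N
  induction N with
  | zero =>
    intro k R hN hk hkn hR
    have : k = -1 := by omega
    subst this
    rw [PySem.List.pyRange_neg_one_eq_nil (by omega)]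
    exact hR
  | succ N ih =>
    intro k R hN hk hkn hR
    by_cases h0 : 0 ≤ k
    · rw [PySem.List.pyRange_neg_one_cons (by omega : (-1:Int) < k), List.foldl_cons]
      apply ih (k - 1) _ (by omega) (by omega) (by omega)
      obtain ⟨hlen, hatt, hmono⟩ := hR
      have hset : ∀ t v, 0 ≤ t → PySem.List.pyGetD (PySem.List.pySetD R k v) t 0 =
          if t = k then v else PySem.List.pyGetD R t 0 := by
        intro t v ht; exact pyGetD_pySetD_int R k t v (by omega) (by omega) ht
      refine ⟨by rw [PySem.List.length_pySetD]; exact hlen, ?_, ?_⟩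
      · intro t htk htn
        by_cases hteq : t = k
        · subst hteq
          rw [hset t _ (by omega), if_pos rfl]
          obtain ⟨⟨j₀, hj0, hj1, hj2⟩, _⟩ := hatt (t + 1) (by omega) (by omega)
          constructor
          · rcases pyMax2_cases (PySem.List.pyGetD arr t 0) (PySem.List.pyGetD R (t + 1) 0) with h | h
            · exact ⟨t, by omega, by omega, by rw [h]; rfl⟩
            · exact ⟨j₀, by omega, by omega, by rw [h]; exact hj2⟩
          · exact pyMax2_ge_left _ _
        · rw [hset t _ (by omega), if_neg hteq]
          exact hatt t (by omega) htn
      · intro t htk htn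
        by_cases hteq : t = k
        · subst hteq
          rw [hset (t + 1) _ (by omega), hset t _ (by omega), if_neg (by omega), if_pos rfl]
          exact pyMax2_ge_right _ _
        · rw [hset (t + 1) _ (by omega), hset t _ (by omega), if_neg (by omega), if_neg hteq]
          exact hmono t (by omega) htn
    · have : k = -1 := by omega
      subst this
      rw [PySem.List.pyRange_neg_one_eq_nil (by omega)]
      exact hR

-- RMax is antitone on [0, n)
theorem R_antitone (arr : List Int) (n : Int) (R : List Int) (hR : RProp arr n R (-1)) :
    ∀ j j' : Int, 0 ≤ j → j ≤ j' → j' < n → PySem.List.pyGetD R j' 0 ≤ PySem.List.pyGetD R j 0 := by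
  intro j j' h0 hle hlt
  obtain ⟨_, _, hmono⟩ := hR
  have H : ∀ m : Int, j ≤ m → m < n → PySem.List.pyGetD R m 0 ≤ PySem.List.pyGetD R j 0 := by
    intro m hm
    induction m, hm using Int.le_induction with
    | base => intro _; exact le_refl _
    | succ m hm ihm =>
      intro hmn
      exact le_trans (hmono m (by omega) (by omega)) (ihm (by omega))
  exact H j' hle hlt

-- --- A-side: the merge loop ---

theorem mergeLoop_le (arr : List Int) (LMin RMax : List Int) (n : Int)
    (hL : LProp arr n LMin n) (hR : RProp arr n RMax (-1)) :
    ∀ i j md, 0 ≤ i → 0 ≤ j → md ≤ maxIndexDiff_alt arr n →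
      mergeLoop LMin RMax n i j md ≤ maxIndexDiff_alt arr n := by
  intro i j md h0i h0j hmd
  fun_induction mergeLoop LMin RMax n i j md with
  | case1 i j md h hle ih =>
    apply ih (by omega) (by omega)
    obtain ⟨_, hent⟩ := hL
    obtain ⟨i₀, hi0, hi1, hi2⟩ := (hent i (by omega) (by omega)).1
    obtain ⟨_, hatt, _⟩ := hR
    obtain ⟨j₀, hj0, hj1, hj2⟩ := (hatt j (by omega) (by omega)).1
    have hji : j - i ≤ maxIndexDiff_alt arr n := by
      by_cases hneg : j - i < 0
      · exact le_trans (by omega) (alt_ge_neg_one arr n)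
      · have hpair : aGet arr i₀ ≤ aGet arr j₀ := by
          rw [← hi2, ← hj2]; exact hle
        have := alt_lb arr n i₀ j₀ hi0 (by omega) (by omega) hpair
        omega
    rcases pyMax2_cases md (j - i) with h' | h' <;> rw [h'] <;> [exact hmd; exact hji]
  | case2 i j md h hle ih => exact ih (by omega) (by omega) hmd
  | case3 i j md h => exact hmd

theorem mergeLoop_ge_md (LMin RMax : List Int) (n : Int) :
    ∀ i j md, md ≤ mergeLoop LMin RMax n i j md := by
  intro i j md
  fun_induction mergeLoop LMin RMax n i j md with
  | case1 i j md h hle ih => exact le_trans (pyMax2_ge_left _ _) ih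
  | case2 i j md h hle ih => exact ih
  | case3 i j md h => exact le_refl _

theorem mergeLoop_ge_pair (arr : List Int) (LMin RMax : List Int) (n : Int)
    (hL : LProp arr n LMin n) (hR : RProp arr n RMax (-1))
    (istar jstar : Int) (h0 : 0 ≤ istar) (hij : istar ≤ jstar) (hjn : jstar < n)
    (ha : aGet arr istar ≤ aGet arr jstar) :
    ∀ i j md, 0 ≤ i → i ≤ j → j ≤ n →
      ((j ≤ jstar ∧ i ≤ istar) ∨ jstar - istar ≤ md) →
      jstar - istar ≤ mergeLoop LMin RMax n i j md := by
  have hLstar : PySem.List.pyGetD LMin istar 0 ≤ PySem.List.pyGetD RMax jstar 0 := by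
    obtain ⟨_, hent⟩ := hL
    obtain ⟨_, hatt, _⟩ := hR
    have h1 : PySem.List.pyGetD LMin istar 0 ≤ aGet arr istar := (hent istar (by omega) (by omega)).2
    have h2 : aGet arr jstar ≤ PySem.List.pyGetD RMax jstar 0 := (hatt jstar (by omega) (by omega)).2
    unfold aGet at *; omega
  intro i j md h0i hijle hjle hinv
  fun_induction mergeLoop LMin RMax n i j md with
  | case1 i j md h hle ih =>
    rcases hinv with ⟨hjj, hii⟩ | hm
    · by_cases hjs : j = jstar
      · subst hjs
        apply ih (by omega) (by omega) (by omega)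
        right
        exact le_trans (by omega) (pyMax2_ge_right md (j - i))
      · exact ih (by omega) (by omega) (by omega) (Or.inl ⟨by omega, hii⟩)
    · apply ih (by omega) (by omega) (by omega)
      right
      exact le_trans hm (pyMax2_ge_left _ _)
  | case2 i j md h hle ih =>
    have hij' : i < j := by
      by_contra hc
      have hieq : i = j := by omega
      subst hieq
      obtain ⟨_, hent⟩ := hL
      obtain ⟨_, hatt, _⟩ := hR
      have h1 : PySem.List.pyGetD LMin i 0 ≤ aGet arr i := (hent i (by omega) (by omega)).2
      have h2 : aGet arr i ≤ PySem.List.pyGetD RMax i 0 := (hatt i (by omega) (by omega)).2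
      omega
    rcases hinv with ⟨hjj, hii⟩ | hm
    · have hiis : i < istar := by
        by_contra hc
        have : i = istar := by omega
        subst this
        have := R_antitone arr n RMax hR j jstar (by omega) (by omega) (by omega)
        omega
      exact ih (by omega) (by omega) (by omega) (Or.inl ⟨hjj, by omega⟩)
    · exact ih (by omega) (by omega) (by omega) (Or.inr hm)
  | case3 i j md h =>
    rcases hinv with ⟨hjj, hii⟩ | hm
    · omega
    · exact hm

-- ===== VERDICT (by name: the statement is the Claim_ definition above) =====
theorem maxIndexDiff_spec : Claim_equal_maxIndexDiff := by
  intro arr n _hdom hpre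
  obtain ⟨hn, hlen⟩ := hpre
  unfold Spec_maxIndexDiff maxIndexDiff
  have hL : LProp arr n ((PySem.List.pyRange 1 n 1).foldl (fun L i =>
      PySem.List.pySetD L i (pyMin2 (PySem.List.pyGetD arr i 0) (PySem.List.pyGetD L (i - 1) 0)))
      (PySem.List.pySetD (List.replicate n.toNat 0) 0 (PySem.List.pyGetD arr 0 0))) n := by
    apply LMin_fold_prop arr n hn (n - 1).toNat 1 _ (by omega) (by omega) (by omega)
    refine ⟨by rw [PySem.List.length_pySetD]; exact List.length_replicate, ?_⟩
    intro t ht0 ht1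
    have hteq : t = 0 := by omega
    subst hteq
    rw [pyGetD_pySetD_int _ 0 0 _ (by omega) (by rw [List.length_replicate]; omega) (by omega), if_pos rfl]
    exact ⟨⟨0, by omega, by omega, rfl⟩, le_refl _⟩
  have hR : RProp arr n ((PySem.List.pyRange (n - 2) (-1) (-1)).foldl (fun R j =>
      PySem.List.pySetD R j (pyMax2 (PySem.List.pyGetD arr j 0) (PySem.List.pyGetD R (j + 1) 0)))
      (PySem.List.pySetD (List.replicate n.toNat 0) (n - 1) (PySem.List.pyGetD arr (n - 1) 0))) (-1) := by
    apply RMax_fold_prop arr n hn (n - 1).toNat (n - 2) _ (by omega) (by omega) (by omega)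
    refine ⟨by rw [PySem.List.length_pySetD]; exact List.length_replicate, ?_, ?_⟩
    · intro t ht0 ht1
      have hteq : t = n - 1 := by omega
      subst hteq
      rw [pyGetD_pySetD_int _ (n - 1) (n - 1) _ (by omega) (by rw [List.length_replicate]; omega) (by omega), if_pos rfl]
      exact ⟨⟨n - 1, by omega, by omega, rfl⟩, le_refl _⟩
    · intro t ht0 ht1
      omega
  apply le_antisymm
  · exact mergeLoop_le arr _ _ n hL hR 0 0 (-1) (by omega) (by omega) (alt_ge_neg_one arr n)
  · rcases alt_cases arr n with hc | ⟨i, j, h0, h1, h2, h3, h4⟩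
    · rw [hc]; exact mergeLoop_ge_md _ _ n 0 0 (-1)
    · rw [h4]
      exact mergeLoop_ge_pair arr _ _ n hL hR i j h0 h1 h2 h3 0 0 (-1)
        (by omega) (by omega) (by omega) (Or.inl ⟨by omega, by omega⟩)
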